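-- pv_equiv track=rewrite | github.com/SeongMyo/Spell_Checker_plus | utils/sentence_cutting.py | cutting_500_under
-- ===== SOURCE A (Python) =====
-- def letter_counter(text, spl=False):
--     if spl==False:
--         text_split = text.split('\n')
--     else:
--         text_split = text
--
--     sum_count = 0
--     for idx in range(len(text_split)):
--         if len(text_split[idx]) != 0:
--             sum_count = sum_count + len(text_split[idx]) + 1
--         elif len(text_split[idx]) == 0:
--             sum_count = sum_count + 1
--
--     return sum_count
--
-- def cutting_idx(text, spl=False):
--     if spl==False:
--         split_text = text.split('\n')
--     else:
--         split_text = text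
--
--     tmp_sum = 0
--     idx_cutted = [0]
--     for idx in range(len(split_text)):
--         if tmp_sum + letter_counter(split_text[idx]) > 500:
--             tmp_sum = letter_counter(split_text[idx])
--             idx_cutted.append(idx)
--         elif tmp_sum + letter_counter(split_text[idx]) <= 500:
--             tmp_sum = tmp_sum + letter_counter(split_text[idx])
--
--     return idx_cutted
--
-- def cutting_500_under(text):
--     separated_sent = []
--     text_split = text.split('\n')
--     cut_idx = cutting_idx(text)
--     idx_last = len(cut_idx) - 1
--     for idx in range(len(cut_idx)):
--         if idx != idx_last:
--             separated_sent.append('\n'.join(text_split[cut_idx[idx]:cut_idx[idx+1]]))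
--         else:
--             separated_sent.append('\n'.join(text_split[cut_idx[idx]:]))
--
--     return separated_sent
-- ===== SOURCE B (Python) =====
-- def cutting_500_under(text):
--     separated_sent = []
--     current = []
--     tmp_sum = 0
--     for line in text.split('\n'):
--         c = len(line) + 1
--         if tmp_sum + c > 500:
--             separated_sent.append('\n'.join(current))
--             current = [line]
--             tmp_sum = c
--         else:
--             current.append(line)
--             tmp_sum += c
--     separated_sent.append('\n'.join(current))
--     return separated_sent
-- ===== Notes on version B (the rewrite author's own statement) =====
-- stated objective: simpler
-- what changed: B replaces A's two-pass scheme (helper letter_counter re-splitting each line, a cut-index table built by cutting_idx, then a separate slicing-and-join pass) with one direct pass that accumulates the current chunk's lines and a running length sum, flushing a joined chunk whenever the 500 budget would be exceeded.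
import Mathlib
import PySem

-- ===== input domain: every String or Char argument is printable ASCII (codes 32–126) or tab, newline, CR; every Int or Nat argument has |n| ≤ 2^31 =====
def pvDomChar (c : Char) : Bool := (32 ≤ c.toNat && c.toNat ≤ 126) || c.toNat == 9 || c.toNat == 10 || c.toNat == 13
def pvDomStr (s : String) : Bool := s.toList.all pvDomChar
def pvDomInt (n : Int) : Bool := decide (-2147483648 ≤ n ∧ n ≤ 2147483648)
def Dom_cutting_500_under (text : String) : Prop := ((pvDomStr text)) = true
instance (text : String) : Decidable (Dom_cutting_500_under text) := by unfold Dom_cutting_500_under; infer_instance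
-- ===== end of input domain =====

-- B replaces A's two-pass scheme (cut-index table, then a slicing/join pass) by one direct pass
-- accumulating the current chunk's lines and their running cost; same return value, no side effects.

-- text.split('\n'): sep is non-empty, so split? never returns none; shared by both ports
def pyLines (text : String) : List String := (PySem.Str.split? text "\n").getD []

-- ===== PORT A =====
def letter_counter (text : String) : Int :=
  -- spl defaults to False on every call A's chain makes, so the spl=False branch is taken
  let text_split := pyLines text
  text_split.foldl (fun sum_count part =>
    if PySem.Str.len part ≠ 0 then sum_count + PySem.Str.len part + 1
    else sum_count + 1) 0

def cutting_idx (text : String) : List Int :=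
  let split_text := pyLines text
  ((PySem.List.enumerate split_text 0).foldl
    (fun (st : Int × List Int) p =>
      if st.1 + letter_counter p.2 > 500 then (letter_counter p.2, st.2 ++ [p.1])
      else (st.1 + letter_counter p.2, st.2))
    (0, [0])).2

def cutting_500_under (text : String) : List String :=
  let text_split := pyLines text
  let cut_idx := cutting_idx text
  let idx_last : Int := (cut_idx.length : Int) - 1
  (PySem.List.enumerate cut_idx 0).foldl
    (fun separated_sent p =>
      if p.1 ≠ idx_last then
        -- cut_idx[idx+1]: always in range here since idx ≠ idx_last, so the pyGet? is always 'some'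
        separated_sent ++ [PySem.Str.join "\n" (PySem.List.slice text_split (some p.2) (PySem.List.pyGet? cut_idx (p.1 + 1)))]
      else
        separated_sent ++ [PySem.Str.join "\n" (PySem.List.slice text_split (some p.2) none)])
    []

-- ===== PORT B =====
def cutting_500_under_alt (text : String) : List String :=
  let st := (pyLines text).foldl
    (fun (st : List String × List String × Int) line =>
      let c := PySem.Str.len line + 1
      if st.2.2 + c > 500 then
        (st.1 ++ [PySem.Str.join "\n" st.2.1], [line], c)
      else
        (st.1, st.2.1 ++ [line], st.2.2 + c))
    ([], [], 0)
  st.1 ++ [PySem.Str.join "\n" st.2.1]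

-- ===== PRECONDITION & SPEC =====
def Spec_cutting_500_under (text : String) (out : List String) : Prop := out = cutting_500_under_alt text
instance (text : String) (out : List String) : Decidable (Spec_cutting_500_under text out) := by unfold Spec_cutting_500_under; infer_instance

-- ===== CLAIM (what is proved, stated in full; the proofs are below) =====
def Claim_equal_cutting_500_under : Prop := ∀ (text : String), Dom_cutting_500_under text → Spec_cutting_500_under text (cutting_500_under text)

-- ===== LEMMAS AND PROOFS =====

-- the greedy chunking both programs compute, as lists of lines
def greedy (ls : List String) (tmp : Int) (cur : List String) : List (List String) :=
  match ls with
  | [] => [cur]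
  | l :: ls' =>
    if tmp + (PySem.Str.len l + 1) > 500 then cur :: greedy ls' (PySem.Str.len l + 1) [l]
    else greedy ls' (tmp + (PySem.Str.len l + 1)) (cur ++ [l])

-- the chunk-start indices A's cutting_idx appends, processing ls from position s with running sum tmp
def starts (ls : List String) (tmp : Int) (s : Nat) : List Int :=
  match ls with
  | [] => []
  | l :: ls' =>
    if tmp + (PySem.Str.len l + 1) > 500 then (s : Int) :: starts ls' (PySem.Str.len l + 1) (s + 1)
    else starts ls' (tmp + (PySem.Str.len l + 1)) (s + 1)

-- A's reconstruction of the chunks from the cut-index list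
def chunksFrom (TS : List String) (cuts : List Int) : List String :=
  match cuts with
  | [] => []
  | [a] => [PySem.Str.join "\n" (PySem.List.slice TS (some a) none)]
  | a :: b :: rest =>
      PySem.Str.join "\n" (PySem.List.slice TS (some a) (some b)) :: chunksFrom TS (b :: rest)

-- named copies of the ports' fold bodies (definitionally equal to the lambdas in the ports)
def altStep (st : List String × List String × Int) (line : String) : List String × List String × Int :=
  let c := PySem.Str.len line + 1
  if st.2.2 + c > 500 then (st.1 ++ [PySem.Str.join "\n" st.2.1], [line], c)
  else (st.1, st.2.1 ++ [line], st.2.2 + c)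

def idxStep (st : Int × List Int) (p : Int × String) : Int × List Int :=
  if st.1 + letter_counter p.2 > 500 then (letter_counter p.2, st.2 ++ [p.1])
  else (st.1 + letter_counter p.2, st.2)

def chunkStep (TS : List String) (CL : List Int) (acc : List String) (p : Int × Int) : List String :=
  if p.1 ≠ (CL.length : Int) - 1 then
    acc ++ [PySem.Str.join "\n" (PySem.List.slice TS (some p.2) (PySem.List.pyGet? CL (p.1 + 1)))]
  else
    acc ++ [PySem.Str.join "\n" (PySem.List.slice TS (some p.2) none)]

theorem alt_eq_fold (text : String) :
    cutting_500_under_alt text =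
      (fun st : List String × List String × Int => st.1 ++ [PySem.Str.join "\n" st.2.1])
        ((pyLines text).foldl altStep ([], [], 0)) := rfl

theorem idx_eq_fold (text : String) :
    cutting_idx text = ((PySem.List.enumerate (pyLines text) 0).foldl idxStep (0, [0])).2 := rfl

theorem a_eq_fold (text : String) :
    cutting_500_under text =
      (PySem.List.enumerate (cutting_idx text) 0).foldl
        (chunkStep (pyLines text) (cutting_idx text)) [] := rfl

-- splitOn.go on a list without the separator char returns it as a single piece
theorem go_no_sep (fuel : Nat) : ∀ (l cur : List Char) (acc : List (List Char)),
    (∀ c ∈ l, c ≠ '\n') →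
    PySem.Chars.splitOn.go ['\n'] fuel l cur acc = ((cur.reverse ++ l) :: acc).reverse := by
  induction fuel with
  | zero => intro l cur acc _; simp [PySem.Chars.splitOn.go]
  | succ n ih =>
    intro l cur acc h
    cases l with
    | nil => simp [PySem.Chars.splitOn.go]
    | cons c rest =>
      have hc : c ≠ '\n' := h c (by simp)
      have hpre : List.isPrefixOf ['\n'] (c :: rest) = false := by
        simp [List.isPrefixOf]; exact fun hh => (hc hh.symm)
      rw [PySem.Chars.splitOn.go, if_neg (by simp [hpre])]
      rw [ih rest (c :: cur) acc (fun x hx => h x (by simp [hx]))]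
      simp

theorem splitOn_no_sep (p : List Char) (h : '\n' ∉ p) :
    PySem.Chars.splitOn p ['\n'] = [p] := by
  unfold PySem.Chars.splitOn
  rw [go_no_sep _ _ _ _ (fun c hc he => h (he ▸ hc))]
  simp

-- every piece splitOn produces is free of the separator char (given enough fuel)
theorem go_mem (fuel : Nat) : ∀ (l cur : List Char) (acc : List (List Char)),
    l.length ≤ fuel → '\n' ∉ cur → (∀ q ∈ acc, '\n' ∉ q) →
    ∀ q ∈ PySem.Chars.splitOn.go ['\n'] fuel l cur acc, '\n' ∉ q := by
  induction fuel with
  | zero =>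
    intro l cur acc hl hcur hacc q hq
    have : l = [] := by cases l <;> simp_all
    subst this
    simp [PySem.Chars.splitOn.go] at hq
    rcases hq with h1 | h2
    · exact hacc q h1
    · subst h2; simp [hcur]
  | succ n ih =>
    intro l cur acc hl hcur hacc q hq
    cases l with
    | nil =>
      simp [PySem.Chars.splitOn.go] at hq
      rcases hq with h1 | h2
      · exact hacc q h1
      · subst h2; simp [hcur]
    | cons c rest =>
      by_cases hc : c = '\n'
      · subst hc
        rw [PySem.Chars.splitOn.go, if_pos (by simp [List.isPrefixOf])] at hq
        refine ih rest [] (cur.reverse :: acc) (by simpa using hl) (by simp) ?_ q (by simpa using hq)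
        intro r hr
        rcases List.mem_cons.mp hr with h1 | h2
        · subst h1; simp [hcur]
        · exact hacc r h2
      · have hc' : '\n' ≠ c := Ne.symm hc
        rw [PySem.Chars.splitOn.go, if_neg (by simp [List.isPrefixOf, hc'])] at hq
        exact ih rest (c :: cur) acc (by simpa using hl)
          (by simp [hcur, hc']) hacc q hq

theorem mem_splitOn_no_sep (s q : List Char) (hq : q ∈ PySem.Chars.splitOn s ['\n']) :
    '\n' ∉ q := by
  unfold PySem.Chars.splitOn at hq
  exact go_mem (s.length + 1) s [] [] (by omega) (by simp) (by simp) q hq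

theorem pyLines_eq (text : String) :
    pyLines text = (PySem.Chars.splitOn text.toList ['\n']).map String.ofList := by
  have hsep : ("\n" : String).toList = ['\n'] := by decide
  simp [pyLines, PySem.Str.split?, PySem.Chars.split?, hsep]

theorem pyLines_no_nl (text : String) : ∀ l ∈ pyLines text, '\n' ∉ l.toList := by
  intro l hl
  rw [pyLines_eq] at hl
  rcases List.mem_map.mp hl with ⟨q, hq, rfl⟩
  simpa using mem_splitOn_no_sep _ q hq

-- on a line without '\n', A's letter_counter is just its length plus one
theorem letter_counter_eq (line : String) (h : '\n' ∉ line.toList) :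
    letter_counter line = PySem.Str.len line + 1 := by
  have hlines : pyLines line = [String.ofList line.toList] := by
    rw [pyLines_eq, splitOn_no_sep _ h]; rfl
  have hlen : PySem.Str.len (String.ofList line.toList) = PySem.Str.len line := by
    simp [PySem.Str.len]
  unfold letter_counter
  rw [hlines]
  simp only [List.foldl_cons, List.foldl_nil, hlen]
  split_ifs with h0
  · ring
  · omega

-- (1) B's single pass computes the joined greedy chunks
theorem alt_fold (ls : List String) : ∀ (res cur : List String) (tmp : Int),
    (fun st : List String × List String × Int => st.1 ++ [PySem.Str.join "\n" st.2.1])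
      (ls.foldl altStep (res, cur, tmp)) =
    res ++ (greedy ls tmp cur).map (PySem.Str.join "\n") := by
  induction ls with
  | nil => intro res cur tmp; simp [greedy]
  | cons l ls' ih =>
    intro res cur tmp
    rw [List.foldl_cons]
    by_cases hcond : 500 < tmp + ((l.length : Int) + 1)
    · have h1 : altStep (res, cur, tmp) l =
          (res ++ [PySem.Str.join "\n" cur], [l], PySem.Str.len l + 1) := by
        simp [altStep, hcond]
      rw [h1, ih]
      simp [greedy, hcond]
    · have h1 : altStep (res, cur, tmp) l =
          (res, cur ++ [l], tmp + (PySem.Str.len l + 1)) := by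
        simp [altStep, hcond]
      rw [h1, ih]
      simp [greedy, hcond]

-- (2) A's cutting_idx fold appends exactly the chunk-start indices
theorem idx_fold (ls : List String) : ∀ (s : Nat) (tmp : Int) (acc : List Int),
    (∀ l ∈ ls, letter_counter l = PySem.Str.len l + 1) →
    ((PySem.List.enumerate ls (s : Int)).foldl idxStep (tmp, acc)).2 =
      acc ++ starts ls tmp s := by
  induction ls with
  | nil => intro s tmp acc _; simp [PySem.List.enumerate, starts]
  | cons l ls' ih =>
    intro s tmp acc h
    rw [PySem.List.enumerate_cons, List.foldl_cons]
    have hl : letter_counter l = PySem.Str.len l + 1 := h l (by simp)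
    have hcast : (s : Int) + 1 = ((s + 1 : Nat) : Int) := by push_cast; ring
    by_cases hcond : 500 < tmp + ((l.length : Int) + 1)
    · have h1 : idxStep (tmp, acc) ((s : Int), l) =
          (PySem.Str.len l + 1, acc ++ [(s : Int)]) := by
        simp [idxStep, hl, hcond]
      rw [h1, hcast, ih (s + 1) _ _ (fun x hx => h x (by simp [hx]))]
      simp [starts, hcond]
    · have h1 : idxStep (tmp, acc) ((s : Int), l) =
          (tmp + (PySem.Str.len l + 1), acc) := by
        simp [idxStep, hl, hcond]
      rw [h1, hcast, ih (s + 1) _ _ (fun x hx => h x (by simp [hx]))]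
      simp [starts, hcond]

-- (3) A's final fold over the cut list is chunksFrom on its suffix
theorem chunks_fold (TS : List String) (CL : List Int) :
    ∀ (cs pre : List Int) (acc : List String), CL = pre ++ cs →
    (PySem.List.enumerate cs (pre.length : Int)).foldl (chunkStep TS CL) acc =
      acc ++ chunksFrom TS cs := by
  intro cs
  induction cs with
  | nil => intro pre acc _; simp [PySem.List.enumerate, chunksFrom]
  | cons c cs' ih =>
    intro pre acc hCL
    rw [PySem.List.enumerate_cons, List.foldl_cons]
    cases cs' with
    | nil =>
      have hlen : CL.length = pre.length + 1 := by rw [hCL]; simp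
      have hcond : ¬ ((pre.length : Int) ≠ (CL.length : Int) - 1) := by
        rw [hlen]; push_cast; omega
      have h1 : chunkStep TS CL acc ((pre.length : Int), c) =
          acc ++ [PySem.Str.join "\n" (PySem.List.slice TS (some c) none)] := by
        simp only [chunkStep]; rw [if_neg hcond]
      rw [h1]
      simp [PySem.List.enumerate, chunksFrom]
    | cons c' rest =>
      have hlen : CL.length = pre.length + (rest.length + 2) := by rw [hCL]; simp
      have hcond : (pre.length : Int) ≠ (CL.length : Int) - 1 := by
        rw [hlen]; push_cast; omega
      have hget : PySem.List.pyGet? CL ((pre.length : Int) + 1) = some c' := by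
        have h1 : ((pre.length : Int) + 1) = ((pre.length + 1 : Nat) : Int) := by push_cast; ring
        rw [h1, PySem.List.pyGet?_natCast, hCL]
        rw [List.getElem?_append_right (by omega)]
        simp
      have h1 : chunkStep TS CL acc ((pre.length : Int), c) =
          acc ++ [PySem.Str.join "\n" (PySem.List.slice TS (some c) (some c'))] := by
        simp only [chunkStep]; rw [if_pos hcond, hget]
      have hcast : (pre.length : Int) + 1 = (((pre ++ [c]).length : Nat) : Int) := by
        simp
      rw [h1, hcast, ih (pre ++ [c]) _ (by rw [hCL]; simp)]
      simp [chunksFrom]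

-- (4) reconstructing slices along the start indices yields the joined greedy chunks
theorem chunks_starts (ls : List String) : ∀ (tmp : Int) (cur TS : List String) (p : Nat),
    TS.drop p = cur ++ ls →
    chunksFrom TS ((p : Int) :: starts ls tmp (p + cur.length)) =
      (greedy ls tmp cur).map (PySem.Str.join "\n") := by
  induction ls with
  | nil =>
    intro tmp cur TS p hdrop
    simp only [starts, greedy, chunksFrom, List.map_cons, List.map_nil]
    rw [PySem.List.slice_from_natCast, hdrop]
    simp
  | cons l ls' ih =>
    intro tmp cur TS p hdrop
    unfold starts greedy
    split_ifs with hcond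
    · -- flush: first chunk is cur, slice TS [p : p+|cur|]
      have hslice : PySem.List.slice TS (some (p : Int)) (some ((p + cur.length : Nat) : Int)) = cur := by
        have h1 : ((p + cur.length : Nat) : Int) = (p : Int) + (cur.length : Int) := by push_cast; ring
        rw [h1, PySem.List.slice_natCast_add, hdrop, List.take_left]
      have hdrop' : TS.drop (p + cur.length) = [l] ++ ls' := by
        rw [← List.drop_drop, hdrop, List.drop_left]; simp
      have hmain := ih (PySem.Str.len l + 1) [l] TS (p + cur.length) hdrop'
      simp only [List.length_cons, List.length_nil, Nat.zero_add] at hmain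
      simp only [chunksFrom, List.map_cons]
      rw [hslice, hmain]
    · -- no flush: same open chunk, one more line
      have hdrop' : TS.drop p = (cur ++ [l]) ++ ls' := by rw [hdrop]; simp
      have hmain := ih (tmp + (PySem.Str.len l + 1)) (cur ++ [l]) TS p hdrop'
      rw [show p + (cur ++ [l]).length = p + cur.length + 1 by simp; omega] at hmain
      exact hmain

-- ===== VERDICT (by name: the statement is the Claim_ definition above) =====
theorem cutting_500_under_spec : Claim_equal_cutting_500_under := by
  unfold Claim_equal_cutting_500_under
  intro text _
  unfold Spec_cutting_500_under
  have hcut : cutting_idx text = (0 : Int) :: starts (pyLines text) 0 0 := by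
    rw [idx_eq_fold]
    have h := idx_fold (pyLines text) 0 0 [0]
      (fun l hl => letter_counter_eq l (pyLines_no_nl text l hl))
    simpa using h
  have hA : cutting_500_under text =
      chunksFrom (pyLines text) ((0 : Int) :: starts (pyLines text) 0 0) := by
    rw [a_eq_fold, hcut]
    have := chunks_fold (pyLines text) ((0 : Int) :: starts (pyLines text) 0 0)
      ((0 : Int) :: starts (pyLines text) 0 0) [] [] (by simp)
    simpa using this
  have hmain : chunksFrom (pyLines text) ((0 : Int) :: starts (pyLines text) 0 0) =
      (greedy (pyLines text) 0 []).map (PySem.Str.join "\n") := by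
    have := chunks_starts (pyLines text) 0 [] (pyLines text) 0 (by simp)
    simpa using this
  rw [hA, hmain, alt_eq_fold]
  have h := alt_fold (pyLines text) [] [] 0
  simpa using h.symm
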